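-- pv_equiv track=rewrite | github.com/miliar/Code_Jam_Webscraper | solutions_python/solutions_year17_round0_nr4/68.py | process
-- ===== SOURCE A (Python) =====
-- def process(N, pawns, bishops):
--   def pawnfilter(s, r, c):
--     for i, j in s:
--       if i != r and j != c:
--         yield i, j
--   def bishopfilter(s, r, c):
--     for i, j in s:
--       if i+j != r+c and i-j != r-c:
--         yield i, j
--   def edgedist(p):
--     r, c = p
--     return min(r, c, N-1-r, N-1-c)
--   free = ((i, j) for i in range(N) for j in range(N))
--   for i, j in pawns:
--     free = pawnfilter(free, i, j)
--   try:
--     while True: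
--       i, j = next(free)
--       pawns.add((i, j))
--       free = pawnfilter(free, i, j)
--   except StopIteration:
--     pass
--   free = ((i, j) for i in range(N) for j in range(N))
--   for i, j in bishops:
--     free = bishopfilter(free, i, j)
--   try:
--     while True:
--       free = list(free)
--       i, j = min(free, key=edgedist)
--       bishops.add((i, j))
--       free = bishopfilter(free, i, j)
--   except ValueError:
--     pass
--   return pawns, bishops
-- ===== SOURCE B (Python) =====
-- def process(N, pawns, bishops):
--     rows = {i for i, _ in pawns}
--     cols = {j for _, j in pawns}
--     free_rows = [r for r in range(N) if r not in rows]
--     free_cols = [c for c in range(N) if c not in cols]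
--     for rc in zip(free_rows, free_cols):
--         pawns.add(rc)
--     sums = {i + j for i, j in bishops}
--     diffs = {i - j for i, j in bishops}
--     def edgedist(p):
--         r, c = p
--         return min(r, c, N - 1 - r, N - 1 - c)
--     squares = [(r, c) for r in range(N) for c in range(N)]
--     squares.sort(key=lambda p: (edgedist(p) * N + p[0]) * N + p[1])
--     for r, c in squares:
--         if r + c not in sums and r - c not in diffs:
--             bishops.add((r, c))
--             sums.add(r + c)
--             diffs.add(r - c)
--     return pawns, bishops
-- ===== Notes on version B (the rewrite author's own statement) =====
-- stated objective: faster
-- what changed: Instead of A's repeated lazy-filter/rescan greedy (recomputing the free-square list and its minimum after every placement), B pairs the unused rows with unused columns in one zip for the rook-pawns, and makes a single pass over the squares pre-sorted by (edge-distance, row, col), keeping used diagonal sums/differences in hash sets, for the bishops.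
import Mathlib
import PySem

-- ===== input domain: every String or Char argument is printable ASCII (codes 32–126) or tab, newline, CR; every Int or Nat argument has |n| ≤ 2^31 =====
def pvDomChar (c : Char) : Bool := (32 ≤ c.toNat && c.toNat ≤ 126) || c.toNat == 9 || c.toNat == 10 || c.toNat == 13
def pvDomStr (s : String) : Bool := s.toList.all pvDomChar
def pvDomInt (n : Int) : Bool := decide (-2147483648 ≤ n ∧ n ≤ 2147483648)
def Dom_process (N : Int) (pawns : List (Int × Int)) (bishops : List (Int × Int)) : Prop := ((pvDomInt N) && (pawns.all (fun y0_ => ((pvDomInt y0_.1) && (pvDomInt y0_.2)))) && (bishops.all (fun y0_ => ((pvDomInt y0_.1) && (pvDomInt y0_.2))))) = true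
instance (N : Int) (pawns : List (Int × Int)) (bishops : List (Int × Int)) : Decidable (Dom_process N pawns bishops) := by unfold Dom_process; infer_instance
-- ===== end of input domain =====

-- B replaces A's repeated lazy-filter/rescan greedy by one zip of unused rows/columns for the rook-pawns
-- and a single pass over the squares sorted by (edge-distance, row, col) with used-diagonal sets for the
-- bishops (measured faster). A mutates its two set arguments in place; the equivalence proved here is
-- about the RETURN value (the returned sets are the mutated arguments).


-- ===== PORT A =====
-- edgedist(p) = min(r, c, N-1-r, N-1-c)  (Python's min folds from the left)
def pyEdgedist (N : Int) (p : Int × Int) : Int :=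
  min (min (min p.1 p.2) (N - 1 - p.1)) (N - 1 - p.2)

-- ((i, j) for i in range(N) for j in range(N))
def pvSquares (N : Int) : List (Int × Int) :=
  (PySem.List.pyRange 0 N 1).flatMap (fun i => (PySem.List.pyRange 0 N 1).map (fun j => (i, j)))

-- the pawn while-loop: take the next free square, add it, filter its row and column away
def pvPawnLoop (free : List (Int × Int)) (s : PySem.Set (Int × Int)) : PySem.Set (Int × Int) :=
  match free with
  | [] => s
  | x :: rest =>
      pvPawnLoop (rest.filter (fun q => decide (q.1 ≠ x.1) && decide (q.2 ≠ x.2))) (PySem.Set.add s (x.1, x.2))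
termination_by free.length
decreasing_by
  simp only [List.length_unattach, List.length_cons]
  exact Nat.lt_succ_of_le (le_trans (List.length_filter_le _ _) (by simp))

-- the bishop while-loop: min(free, key=edgedist) (ValueError on empty ends it), add, filter both diagonals
def pvBishopLoop (N : Int) (free : List (Int × Int)) (s : PySem.Set (Int × Int)) : PySem.Set (Int × Int) :=
  match h : PySem.List.min? free (pyEdgedist N) with
  | none => s
  | some m =>
      pvBishopLoop N
        (free.filter (fun q => decide (q.1 + q.2 ≠ m.1 + m.2) && decide (q.1 - q.2 ≠ m.1 - m.2)))
        (PySem.Set.add s m)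
termination_by free.length
decreasing_by
  simp only [List.length_unattach]
  calc (List.filter _ free.attach).length
      < free.attach.length := by
        refine List.length_filter_lt_length_iff_exists.mpr
          ⟨⟨m, PySem.List.min?_mem h⟩, List.mem_attach _ _, by simp⟩
    _ = free.length := List.length_attach

def process (N : Int) (pawns : List (Int × Int)) (bishops : List (Int × Int)) : (List (Int × Int)) × (List (Int × Int)) :=
  -- chained pawnfilter generators = one filter per pawn, applied in turn
  let free1 := pawns.foldl
    (fun f p => f.filter (fun q => decide (q.1 ≠ p.1) && decide (q.2 ≠ p.2))) (pvSquares N)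
  let pawns2 := pvPawnLoop free1 pawns
  let free2 := bishops.foldl
    (fun f p => f.filter (fun q => decide (q.1 + q.2 ≠ p.1 + p.2) && decide (q.1 - q.2 ≠ p.1 - p.2))) (pvSquares N)
  let bishops2 := pvBishopLoop N free2 bishops
  (pawns2, bishops2)

-- ===== PORT B =====
-- key=lambda p: (edgedist(p) * N + p[0]) * N + p[1]
def pvRankKey (N : Int) (p : Int × Int) : Int := (pyEdgedist N p * N + p.1) * N + p.2

def process_alt (N : Int) (pawns : List (Int × Int)) (bishops : List (Int × Int)) : (List (Int × Int)) × (List (Int × Int)) :=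
  let rows := PySem.Set.ofList (pawns.map Prod.fst)
  let cols := PySem.Set.ofList (pawns.map Prod.snd)
  let freeRows := (PySem.List.pyRange 0 N 1).filter (fun r => !(PySem.Set.contains rows r))
  let freeCols := (PySem.List.pyRange 0 N 1).filter (fun c => !(PySem.Set.contains cols c))
  let pawns2 := (freeRows.zip freeCols).foldl (fun s rc => PySem.Set.add s rc) pawns
  let sums0 := PySem.Set.ofList (bishops.map (fun b => b.1 + b.2))
  let diffs0 := PySem.Set.ofList (bishops.map (fun b => b.1 - b.2))
  let sq := PySem.List.sorted (pvSquares N) (pvRankKey N)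
  let st := sq.foldl
    (fun (st : PySem.Set (Int × Int) × PySem.Set Int × PySem.Set Int) p =>
      if !(PySem.Set.contains st.2.1 (p.1 + p.2)) && !(PySem.Set.contains st.2.2 (p.1 - p.2)) then
        (PySem.Set.add st.1 p, PySem.Set.add st.2.1 (p.1 + p.2), PySem.Set.add st.2.2 (p.1 - p.2))
      else st)
    (bishops, sums0, diffs0)
  (pawns2, st.1)

-- ===== PRECONDITION & SPEC =====
def Spec_process (N : Int) (pawns : List (Int × Int)) (bishops : List (Int × Int)) (out : (List (Int × Int)) × (List (Int × Int))) : Prop := out = process_alt N pawns bishops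
instance (N : Int) (pawns : List (Int × Int)) (bishops : List (Int × Int)) (out : (List (Int × Int)) × (List (Int × Int))) : Decidable (Spec_process N pawns bishops out) := by unfold Spec_process; infer_instance

-- ===== CLAIM (what is proved, stated in full; the proofs are below) =====
def Claim_equal_process : Prop := ∀ (N : Int) (pawns : List (Int × Int)) (bishops : List (Int × Int)), Dom_process N pawns bishops → Spec_process N pawns bishops (process N pawns bishops)

-- ===== LEMMAS AND PROOFS =====

-- a square of the board
def pvInBoard (N : Int) (x : Int × Int) : Prop := 0 ≤ x.1 ∧ x.1 < N ∧ 0 ≤ x.2 ∧ x.2 < N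

-- x is attacked by no bishop in s
def pvFreeB (s : List (Int × Int)) (x : Int × Int) : Prop :=
  ∀ b ∈ s, b.1 + b.2 ≠ x.1 + x.2 ∧ b.1 - b.2 ≠ x.1 - x.2

def pvFreeBb (s : List (Int × Int)) (x : Int × Int) : Bool :=
  s.all (fun b => decide (b.1 + b.2 ≠ x.1 + x.2) && decide (b.1 - b.2 ≠ x.1 - x.2))

-- abstract single pass: pick every still-unattacked square in order
def pvScan (L : List (Int × Int)) (s : PySem.Set (Int × Int)) : PySem.Set (Int × Int) :=
  match L with
  | [] => s
  | x :: t => if pvFreeBb s x then pvScan t (PySem.Set.add s x) else pvScan t s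

-- cartesian product in row-major order
def pvF (rs cs : List Int) : List (Int × Int) := rs.flatMap (fun i => cs.map (fun j => (i, j)))

lemma pvFreeBb_eq (s : List (Int × Int)) (x : Int × Int) : pvFreeBb s x = true ↔ pvFreeB s x := by
  simp [pvFreeBb, pvFreeB]

lemma pv_foldl_filter {α β : Type} (bs : List β) (pr : β → α → Bool) :
    ∀ l : List α, bs.foldl (fun f b => f.filter (pr b)) l = l.filter (fun x => bs.all (fun b => pr b x)) := by
  induction bs with
  | nil => intro l; simp
  | cons b bs ih =>
      intro l
      simp only [List.foldl_cons, ih, List.filter_filter, List.all_cons]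
      exact List.filter_congr (fun x _ => by rw [Bool.and_comm])

lemma pv_filter_F (rs cs : List Int) (p q : Int → Bool) :
    (pvF rs cs).filter (fun x => p x.1 && q x.2) = pvF (rs.filter p) (cs.filter q) := by
  induction rs with
  | nil => simp [pvF]
  | cons r rs ih =>
      simp only [pvF, List.flatMap_cons, List.filter_append] at *
      rw [ih]
      by_cases hp : p r
      · simp [hp, List.filter_map, Function.comp_def]
      · simp [hp, List.filter_map, Function.comp_def]

lemma pv_pawnLoop_F : ∀ (rs cs : List Int) (s : PySem.Set (Int × Int)), rs.Nodup → cs.Nodup →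
    pvPawnLoop (pvF rs cs) s = (rs.zip cs).foldl PySem.Set.add s := by
  intro rs
  induction rs with
  | nil => intro cs s _ _; simp [pvF, pvPawnLoop]
  | cons r rs ih =>
      intro cs s hrs hcs
      cases cs with
      | nil =>
          have h0 : List.flatMap (fun _ : Int => ([] : List (Int × Int))) rs = [] := by simp
          simp only [pvF, List.flatMap_cons, List.map_nil, List.nil_append, h0]
          simp [pvPawnLoop]
      | cons c cs =>
          rw [List.nodup_cons] at hrs hcs
          have hF : pvF (r :: rs) (c :: cs) =
              (r, c) :: ((cs.map fun j => (r, j)) ++ pvF rs (c :: cs)) := by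
            simp [pvF]
          rw [hF, pvPawnLoop]
          have h1 : (cs.map fun j => (r, j)).filter
              (fun q => decide (q.1 ≠ (r, c).1) && decide (q.2 ≠ (r, c).2)) = [] := by
            simp [List.filter_map, Function.comp_def]
          have h2 : (pvF rs (c :: cs)).filter
              (fun q => decide (q.1 ≠ (r, c).1) && decide (q.2 ≠ (r, c).2)) = pvF rs cs := by
            rw [pv_filter_F rs (c :: cs) (fun i => decide (i ≠ r)) (fun j => decide (j ≠ c))]
            congr 1
            · exact List.filter_eq_self.mpr (fun a ha => by
                simp only [decide_eq_true_eq]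
                exact fun he => hrs.1 (he ▸ ha))
            · rw [List.filter_cons]
              simp only [ne_eq, not_true_eq_false, decide_false, Bool.false_eq_true, if_false]
              exact List.filter_eq_self.mpr (fun a ha => by
                simp only [decide_eq_true_eq]
                intro he; exact hcs.1 (he ▸ ha))
          rw [List.filter_append, h1, h2, List.nil_append]
          rw [ih cs (PySem.Set.add s ((r, c).1, (r, c).2)) hrs.2 hcs.2]
          rfl

lemma pv_min?_congr {α : Type} (k K : α → Int) (F : List α)
    (h : F.Pairwise (fun a b => (k b < k a ↔ K b < K a))) :
    PySem.List.min? F k = PySem.List.min? F K := by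
  have aux : ∀ (t : List α) (m : α), (∀ x ∈ t, (k x < k m ↔ K x < K m)) →
      t.Pairwise (fun a b => (k b < k a ↔ K b < K a)) →
      t.foldl (fun acc x => match acc with
        | none => some x
        | some m => if k x < k m then some x else some m) (some m) =
      t.foldl (fun acc x => match acc with
        | none => some x
        | some m => if K x < K m then some x else some m) (some m) := by
    intro t
    induction t with
    | nil => intro m _ _; rfl
    | cons x t ih =>
        intro m hm hp
        rw [List.pairwise_cons] at hp
        simp only [List.foldl_cons]
        have hx := hm x List.mem_cons_self
        by_cases hk : k x < k m
        · have hK : K x < K m := hx.mp hk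
          simp only [if_pos hk, if_pos hK]
          exact ih x (fun y hy => hp.1 y hy) hp.2
        · have hK : ¬ K x < K m := fun h => hk (hx.mpr h)
          simp only [if_neg hk, if_neg hK]
          exact ih m (fun y hy => hm y (List.mem_cons_of_mem _ hy)) hp.2
  cases F with
  | nil => rfl
  | cons x t =>
      rw [List.pairwise_cons] at h
      simp only [PySem.List.min?, List.foldl_cons]
      exact aux t x (fun y hy => h.1 y hy) h.2

lemma pv_rank_lt_iff (N : Int) {a b : Int × Int} (ha : pvInBoard N a) (hb : pvInBoard N b)
    (hij : a.1 * N + a.2 < b.1 * N + b.2) :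
    (pyEdgedist N b < pyEdgedist N a ↔ pvRankKey N b < pvRankKey N a) := by
  obtain ⟨ha1, ha2, ha3, ha4⟩ := ha
  obtain ⟨hb1, hb2, hb3, hb4⟩ := hb
  have hN : 0 < N := lt_of_le_of_lt ha1 ha2
  have key : ∀ x : Int × Int, pvRankKey N x = pyEdgedist N x * (N * N) + (x.1 * N + x.2) := by
    intro x; rw [pvRankKey]; ring
  rw [key, key]
  constructor
  · intro h
    have h1 : pyEdgedist N a - pyEdgedist N b ≥ 1 := by omega
    nlinarith [ha2, ha4, hb1, hb3, hij]
  · intro h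
    by_contra hc
    push Not at hc
    have h1 : pyEdgedist N b - pyEdgedist N a ≥ 0 := by omega
    nlinarith [hij]

lemma pv_rank_inj (N : Int) {a b : Int × Int} (ha : pvInBoard N a) (hb : pvInBoard N b)
    (h : pvRankKey N a = pvRankKey N b) : a = b := by
  obtain ⟨ha1, ha2, ha3, ha4⟩ := ha
  obtain ⟨hb1, hb2, hb3, hb4⟩ := hb
  have hN : 0 < N := lt_of_le_of_lt ha1 ha2
  have key : ∀ x : Int × Int, pvRankKey N x = pyEdgedist N x * (N * N) + (x.1 * N + x.2) := by
    intro x; rw [pvRankKey]; ring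
  rw [key, key] at h
  have hidxa : 0 ≤ a.1 * N + a.2 ∧ a.1 * N + a.2 < N * N := by
    constructor
    · nlinarith
    · nlinarith
  have hidxb : 0 ≤ b.1 * N + b.2 ∧ b.1 * N + b.2 < N * N := by
    constructor
    · nlinarith
    · nlinarith
  have he : pyEdgedist N a = pyEdgedist N b := by
    by_contra hc
    rcases lt_or_gt_of_ne hc with hlt | hgt
    · have : pyEdgedist N b - pyEdgedist N a ≥ 1 := by omega
      nlinarith
    · have : pyEdgedist N a - pyEdgedist N b ≥ 1 := by omega
      nlinarith
  have hidx : a.1 * N + a.2 = b.1 * N + b.2 := by rw [he] at h; linarith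
  have hr : a.1 = b.1 := by
    by_contra hc
    rcases lt_or_gt_of_ne hc with hlt | hgt
    · have : b.1 - a.1 ≥ 1 := by omega
      nlinarith
    · have : a.1 - b.1 ≥ 1 := by omega
      nlinarith
  have hcc : a.2 = b.2 := by rw [hr] at hidx; linarith
  exact Prod.ext hr hcc

lemma pv_pairwise_lt_of_le {α : Type} (K : α → Int) (L : List α)
    (hle : L.Pairwise (fun a b => K a ≤ K b)) (hnd : L.Nodup)
    (hinj : ∀ a ∈ L, ∀ b ∈ L, K a = K b → a = b) :
    L.Pairwise (fun a b => K a < K b) := by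
  have h2 : L.Pairwise (fun a b => K a ≤ K b ∧ a ≠ b) := hle.and hnd
  refine List.Pairwise.imp_of_mem ?_ h2
  intro a b ha hb hab
  exact lt_of_le_of_ne hab.1 (fun he => hab.2 (hinj a ha b hb he))

lemma pv_sorted_cons_min (N : Int) (F : List (Int × Int)) (m : Int × Int)
    (hb : ∀ x ∈ F, pvInBoard N x) (hnd : F.Nodup) (hm : m ∈ F)
    (hmin : ∀ y ∈ F, y ≠ m → pvRankKey N m < pvRankKey N y) :
    PySem.List.sorted F (pvRankKey N) = m :: PySem.List.sorted (F.erase m) (pvRankKey N) := by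
  apply PySem.List.sorted_eq_of_perm_of_pairwise_lt
  · exact ((PySem.List.sorted_perm (F.erase m) (pvRankKey N) false).cons m).trans
      (List.perm_cons_erase hm).symm
  · rw [List.pairwise_cons]
    constructor
    · intro y hy
      rw [PySem.List.mem_sorted] at hy
      have hyF : y ∈ F := (List.erase_sublist).mem hy
      have hym : y ≠ m := by
        intro rfl2
        subst rfl2
        exact (List.Nodup.not_mem_erase hnd) hy
      exact hmin y hyF hym
    · refine pv_pairwise_lt_of_le (pvRankKey N) _ (PySem.List.sorted_pairwise _ _) ?_ ?_
      · exact ((PySem.List.sorted_perm (F.erase m) (pvRankKey N) false).nodup_iff).mpr (hnd.erase m)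
      · intro a haa b hbb he
        rw [PySem.List.mem_sorted] at haa hbb
        exact pv_rank_inj N (hb a ((List.erase_sublist).mem haa))
          (hb b ((List.erase_sublist).mem hbb)) he

lemma pv_sorted_filter_comm (N : Int) (F : List (Int × Int)) (q : Int × Int → Bool)
    (hb : ∀ x ∈ F, pvInBoard N x) (hnd : F.Nodup) :
    (PySem.List.sorted F (pvRankKey N)).filter q = PySem.List.sorted (F.filter q) (pvRankKey N) := by
  symm
  apply PySem.List.sorted_eq_of_perm_of_pairwise_lt
  · exact (PySem.List.sorted_perm F (pvRankKey N) false).filter q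
  · have hlt : (PySem.List.sorted F (pvRankKey N)).Pairwise
        (fun a b => pvRankKey N a < pvRankKey N b) := by
      refine pv_pairwise_lt_of_le (pvRankKey N) _ (PySem.List.sorted_pairwise _ _) ?_ ?_
      · exact ((PySem.List.sorted_perm F (pvRankKey N) false).nodup_iff).mpr hnd
      · intro a haa b hbb he
        rw [PySem.List.mem_sorted] at haa hbb
        exact pv_rank_inj N (hb a haa) (hb b hbb) he
    exact hlt.filter q

lemma pv_freeB_mono (s : PySem.Set (Int × Int)) (m x : Int × Int)
    (h : pvFreeB (PySem.Set.add s m) x) : pvFreeB s x := by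
  intro b hb
  exact h b ((PySem.Set.mem_add s m b).mpr (Or.inl hb))

lemma pv_freeB_add (s : PySem.Set (Int × Int)) (m x : Int × Int) :
    pvFreeB (PySem.Set.add s m) x ↔ pvFreeB s x ∧ (m.1 + m.2 ≠ x.1 + x.2 ∧ m.1 - m.2 ≠ x.1 - x.2) := by
  constructor
  · intro h
    exact ⟨pv_freeB_mono s m x h, h m ((PySem.Set.mem_add s m m).mpr (Or.inr rfl))⟩
  · rintro ⟨h1, h2⟩ b hb
    rcases (PySem.Set.mem_add s m b).mp hb with hb' | rfl
    · exact h1 b hb'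
    · exact h2

lemma pv_scan_filter (q : Int × Int → Bool) :
    ∀ (L : List (Int × Int)) (s : PySem.Set (Int × Int)),
      (∀ x ∈ L, q x = false → ¬ pvFreeB s x) → pvScan L s = pvScan (L.filter q) s := by
  intro L
  induction L with
  | nil => intro s _; rfl
  | cons x t ih =>
      intro s h
      by_cases hq : q x
      · simp only [List.filter_cons, hq, if_true, pvScan]
        by_cases hf : pvFreeBb s x
        · simp only [hf, if_true]
          refine ih _ (fun y hy hqy => ?_)
          intro hfree
          exact h y (List.mem_cons_of_mem _ hy) hqy (pv_freeB_mono _ _ _ hfree)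
        · simp only [hf]
          exact ih _ (fun y hy hqy => h y (List.mem_cons_of_mem _ hy) hqy)
      · have hx : ¬ pvFreeB s x := h x List.mem_cons_self (by simpa using hq)
        have hxb : pvFreeBb s x = false := by
          rw [← Bool.not_eq_true, pvFreeBb_eq]; exact hx
        simp only [List.filter_cons, hq, pvScan, hxb, if_false, Bool.false_eq_true]
        exact ih _ (fun y hy hqy => h y (List.mem_cons_of_mem _ hy) hqy)

lemma pvBishopLoop_none {N : Int} {F : List (Int × Int)} {s : PySem.Set (Int × Int)}
    (h : PySem.List.min? F (pyEdgedist N) = none) : pvBishopLoop N F s = s := by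
  rw [pvBishopLoop]
  split
  · rfl
  · rename_i m hm
    rw [h] at hm
    cases hm

lemma pvBishopLoop_some {N : Int} {F : List (Int × Int)} {s : PySem.Set (Int × Int)} {m : Int × Int}
    (h : PySem.List.min? F (pyEdgedist N) = some m) :
    pvBishopLoop N F s = pvBishopLoop N
      (F.filter (fun q => decide (q.1 + q.2 ≠ m.1 + m.2) && decide (q.1 - q.2 ≠ m.1 - m.2)))
      (PySem.Set.add s m) := by
  rw [pvBishopLoop]
  split
  · rename_i hm
    rw [h] at hm
    cases hm
  · rename_i m' hm
    rw [h] at hm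
    cases hm
    rfl

lemma pv_bishop_main (N : Int) : ∀ (n : Nat) (F : List (Int × Int)) (s : PySem.Set (Int × Int)),
    F.length ≤ n → (∀ x ∈ F, pvInBoard N x) →
    F.Pairwise (fun a b => a.1 * N + a.2 < b.1 * N + b.2) →
    (∀ x ∈ F, pvFreeB s x) →
    pvBishopLoop N F s = pvScan (PySem.List.sorted F (pvRankKey N)) s := by
  intro n
  induction n with
  | zero =>
      intro F s hlen _ _ _
      have hFe : F = [] := List.eq_nil_of_length_eq_zero (Nat.le_zero.mp hlen)
      subst hFe
      rw [pvBishopLoop_none (by rfl)]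
      rfl
  | succ n ih =>
      intro F s hlen hb hpw hfree
      cases hF : PySem.List.min? F (pyEdgedist N) with
      | none =>
          have hFe : F = [] := (PySem.List.min?_eq_none_iff _ _).mp hF
          subst hFe
          rw [pvBishopLoop_none (by rfl)]
          rfl
      | some m =>
          have hmF : m ∈ F := PySem.List.min?_mem hF
          have hnd : F.Nodup := by
            have : F.Pairwise (fun a b => a ≠ b) := by
              refine hpw.imp ?_
              intro a b hab he
              rw [he] at hab
              exact lt_irrefl _ hab
            exact this
          have hrel : F.Pairwise
              (fun a b => (pyEdgedist N b < pyEdgedist N a ↔ pvRankKey N b < pvRankKey N a)) := by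
            refine hpw.imp_of_mem ?_
            intro a b ha hb' hab
            exact pv_rank_lt_iff N (hb a ha) (hb b hb') hab
          have hKF : PySem.List.min? F (pvRankKey N) = some m := by
            rw [← pv_min?_congr (pyEdgedist N) (pvRankKey N) F hrel]
            exact hF
          have hmin : ∀ y ∈ F, y ≠ m → pvRankKey N m < pvRankKey N y := by
            intro y hy hne
            have hle := PySem.List.min?_isMin hKF y hy
            refine lt_of_le_of_ne hle (fun he => ?_)
            exact hne (pv_rank_inj N (hb m hmF) (hb y hy) he).symm
          have hpeel := pv_sorted_cons_min N F m hb hnd hmF hmin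
          have hqm : (fun x : Int × Int => decide (x.1 + x.2 ≠ m.1 + m.2) && decide (x.1 - x.2 ≠ m.1 - m.2)) m = false := by
            simp
          rw [pvBishopLoop_some hF]
          have hlen' : (F.filter (fun x : Int × Int => decide (x.1 + x.2 ≠ m.1 + m.2) && decide (x.1 - x.2 ≠ m.1 - m.2))).length ≤ n := by
            have hlt : (F.filter (fun x : Int × Int => decide (x.1 + x.2 ≠ m.1 + m.2) && decide (x.1 - x.2 ≠ m.1 - m.2))).length < F.length :=
              List.length_filter_lt_length_iff_exists.mpr ⟨m, hmF, by simp⟩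
            omega
          have hb' : ∀ x ∈ F.filter (fun x : Int × Int => decide (x.1 + x.2 ≠ m.1 + m.2) && decide (x.1 - x.2 ≠ m.1 - m.2)), pvInBoard N x :=
            fun x hx => hb x (List.mem_of_mem_filter hx)
          have hpw' := hpw.filter (fun x : Int × Int => decide (x.1 + x.2 ≠ m.1 + m.2) && decide (x.1 - x.2 ≠ m.1 - m.2))
          have hfree' : ∀ x ∈ F.filter (fun x : Int × Int => decide (x.1 + x.2 ≠ m.1 + m.2) && decide (x.1 - x.2 ≠ m.1 - m.2)), pvFreeB (PySem.Set.add s m) x := by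
            intro x hx
            rw [List.mem_filter] at hx
            rw [pv_freeB_add]
            refine ⟨hfree x hx.1, ?_, ?_⟩
            · have h2 := hx.2
              simp only [Bool.and_eq_true, decide_eq_true_eq] at h2
              exact Ne.symm h2.1
            · have h2 := hx.2
              simp only [Bool.and_eq_true, decide_eq_true_eq] at h2
              exact Ne.symm h2.2
          rw [ih _ _ hlen' hb' hpw' hfree']
          rw [hpeel]
          have hfm : pvFreeBb s m = true := (pvFreeBb_eq _ _).mpr (hfree m hmF)
          conv_rhs => rw [pvScan]
          rw [hfm]
          simp only [if_true]
          have heq : (F.erase m).filter (fun x : Int × Int => decide (x.1 + x.2 ≠ m.1 + m.2) && decide (x.1 - x.2 ≠ m.1 - m.2)) = F.filter (fun x : Int × Int => decide (x.1 + x.2 ≠ m.1 + m.2) && decide (x.1 - x.2 ≠ m.1 - m.2)) := by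
            rw [hnd.erase_eq_filter m, List.filter_filter]
            refine List.filter_congr ?_
            intro x _
            by_cases hxm : x = m
            · subst hxm; simp
            · simp [hxm]
          have hbe : ∀ x ∈ F.erase m, pvInBoard N x := fun x hx => hb x ((List.erase_sublist).mem hx)
          have hscomm := pv_sorted_filter_comm N (F.erase m)
            (fun x : Int × Int => decide (x.1 + x.2 ≠ m.1 + m.2) && decide (x.1 - x.2 ≠ m.1 - m.2)) hbe (hnd.erase m)
          rw [← heq, ← hscomm]
          symm
          refine pv_scan_filter _ _ _ ?_
          intro x _ hqx hfx
          have hmm : m ∈ PySem.Set.add s m := (PySem.Set.mem_add s m m).mpr (Or.inr rfl)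
          have hatt := hfx m hmm
          simp only [Bool.and_eq_false_iff, decide_eq_false_iff_not, ne_eq, not_not] at hqx
          rcases hqx with h | h
          · exact hatt.1 h.symm
          · exact hatt.2 h.symm

lemma pv_fold_scan : ∀ (L : List (Int × Int)) (s : PySem.Set (Int × Int)) (sums diffs : PySem.Set Int),
    (∀ v, PySem.Set.contains sums v = true ↔ ∃ b ∈ s, b.1 + b.2 = v) →
    (∀ v, PySem.Set.contains diffs v = true ↔ ∃ b ∈ s, b.1 - b.2 = v) →
    (L.foldl
      (fun (st : PySem.Set (Int × Int) × PySem.Set Int × PySem.Set Int) p =>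
        if !(PySem.Set.contains st.2.1 (p.1 + p.2)) && !(PySem.Set.contains st.2.2 (p.1 - p.2)) then
          (PySem.Set.add st.1 p, PySem.Set.add st.2.1 (p.1 + p.2), PySem.Set.add st.2.2 (p.1 - p.2))
        else st)
      (s, sums, diffs)).1 = pvScan L s := by
  intro L
  induction L with
  | nil => intro s sums diffs _ _; rfl
  | cons p t ih =>
      intro s sums diffs hsums hdiffs
      by_cases hf : pvFreeB s p
      · have h1 : PySem.Set.contains sums (p.1 + p.2) = false := by
          rw [← Bool.not_eq_true, hsums]
          rintro ⟨b, hb, he⟩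
          exact (hf b hb).1 he
        have h2 : PySem.Set.contains diffs (p.1 - p.2) = false := by
          rw [← Bool.not_eq_true, hdiffs]
          rintro ⟨b, hb, he⟩
          exact (hf b hb).2 he
        have hfb : pvFreeBb s p = true := (pvFreeBb_eq s p).mpr hf
        simp only [List.foldl_cons, h1, h2, Bool.not_false, Bool.and_self, if_true, pvScan, hfb]
        refine ih _ _ _ ?_ ?_
        · intro v
          rw [PySem.Set.contains_iff, PySem.Set.mem_add, ← PySem.Set.contains_iff sums v, hsums v]
          constructor
          · rintro (⟨b, hb, he⟩ | rfl)
            · exact ⟨b, (PySem.Set.mem_add s p b).mpr (Or.inl hb), he⟩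
            · exact ⟨p, (PySem.Set.mem_add s p p).mpr (Or.inr rfl), rfl⟩
          · rintro ⟨b, hb, he⟩
            rcases (PySem.Set.mem_add s p b).mp hb with hb' | rfl
            · exact Or.inl ⟨b, hb', he⟩
            · exact Or.inr he.symm
        · intro v
          rw [PySem.Set.contains_iff, PySem.Set.mem_add, ← PySem.Set.contains_iff diffs v, hdiffs v]
          constructor
          · rintro (⟨b, hb, he⟩ | rfl)
            · exact ⟨b, (PySem.Set.mem_add s p b).mpr (Or.inl hb), he⟩
            · exact ⟨p, (PySem.Set.mem_add s p p).mpr (Or.inr rfl), rfl⟩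
          · rintro ⟨b, hb, he⟩
            rcases (PySem.Set.mem_add s p b).mp hb with hb' | rfl
            · exact Or.inl ⟨b, hb', he⟩
            · exact Or.inr he.symm
      · have hC : (!(PySem.Set.contains sums (p.1 + p.2)) && !(PySem.Set.contains diffs (p.1 - p.2))) = false := by
          rw [pvFreeB] at hf
          push Not at hf
          obtain ⟨b, hb, hor⟩ := hf
          by_cases he : b.1 + b.2 = p.1 + p.2
          · have hc1 : PySem.Set.contains sums (p.1 + p.2) = true := (hsums _).mpr ⟨b, hb, he⟩
            rw [hc1]
            simp
          · have hc2 : PySem.Set.contains diffs (p.1 - p.2) = true := (hdiffs _).mpr ⟨b, hb, hor he⟩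
            rw [hc2]
            simp
        have hfb : pvFreeBb s p = false := by
          rw [← Bool.not_eq_true, pvFreeBb_eq]; exact hf
        simp only [List.foldl_cons, hC, pvScan, hfb, Bool.false_eq_true, if_false]
        exact ih _ _ _ hsums hdiffs

lemma pv_mem_squares (N : Int) (x : Int × Int) : x ∈ pvSquares N ↔ pvInBoard N x := by
  cases x with
  | mk r c =>
      simp only [pvSquares, List.mem_flatMap, List.mem_map, PySem.List.mem_pyRange_one, pvInBoard]
      constructor
      · rintro ⟨i, hi, j, hj, heq⟩
        cases heq
        exact ⟨hi.1, hi.2, hj.1, hj.2⟩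
      · rintro ⟨h1, h2, h3, h4⟩
        exact ⟨r, ⟨h1, h2⟩, c, ⟨h3, h4⟩, rfl⟩

lemma pv_squares_pairwise (N : Int) :
    (pvSquares N).Pairwise (fun a b => a.1 * N + a.2 < b.1 * N + b.2) := by
  rw [pvSquares, List.pairwise_flatMap]
  constructor
  · intro i _
    rw [List.pairwise_map]
    refine (PySem.List.pairwise_lt_pyRange_one (a := 0) (b := N)).imp_of_mem ?_
    intro a b _ _ hab
    simpa using hab
  · refine (PySem.List.pairwise_lt_pyRange_one (a := 0) (b := N)).imp_of_mem ?_
    intro i1 i2 h1 h2 hlt x hx y hy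
    rw [List.mem_map] at hx hy
    obtain ⟨a, ha, rfl⟩ := hx
    obtain ⟨b, hb, rfl⟩ := hy
    rw [PySem.List.mem_pyRange_one] at ha hb h1 h2
    simp only []
    nlinarith [ha.1, ha.2, hb.1, hb.2, hlt]

lemma pv_pawn_eq (N : Int) (pawns : List (Int × Int)) :
    pvPawnLoop (pawns.foldl
        (fun f p => f.filter (fun q => decide (q.1 ≠ p.1) && decide (q.2 ≠ p.2))) (pvSquares N)) pawns
    = ((((PySem.List.pyRange 0 N 1).filter
          (fun r => !(PySem.Set.contains (PySem.Set.ofList (pawns.map Prod.fst)) r))).zip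
        ((PySem.List.pyRange 0 N 1).filter
          (fun c => !(PySem.Set.contains (PySem.Set.ofList (pawns.map Prod.snd)) c)))).foldl
        (fun s rc => PySem.Set.add s rc) pawns) := by
  rw [pv_foldl_filter pawns (fun p q => decide (q.1 ≠ p.1) && decide (q.2 ≠ p.2)) (pvSquares N)]
  have hsplit : (pvSquares N).filter
        (fun x => pawns.all (fun p => decide (x.1 ≠ p.1) && decide (x.2 ≠ p.2)))
      = (pvSquares N).filter
        (fun x => (pawns.all fun p => decide (x.1 ≠ p.1)) && (pawns.all fun p => decide (x.2 ≠ p.2))) := by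
    refine List.filter_congr ?_
    intro x _
    rw [Bool.eq_iff_iff]
    simp only [List.all_eq_true, Bool.and_eq_true, decide_eq_true_eq]
    constructor
    · intro h
      exact ⟨fun p hp => (h p hp).1, fun p hp => (h p hp).2⟩
    · intro h p hp
      exact ⟨h.1 p hp, h.2 p hp⟩
  rw [hsplit]
  have hFsq : pvSquares N = pvF (PySem.List.pyRange 0 N 1) (PySem.List.pyRange 0 N 1) := rfl
  rw [hFsq, pv_filter_F (PySem.List.pyRange 0 N 1) (PySem.List.pyRange 0 N 1)
    (fun i => pawns.all fun p => decide (i ≠ p.1)) (fun j => pawns.all fun p => decide (j ≠ p.2)),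
    pv_pawnLoop_F _ _ pawns
    (List.Nodup.filter _ (PySem.List.nodup_pyRange_one 0 N))
    (List.Nodup.filter _ (PySem.List.nodup_pyRange_one 0 N))]
  have hr : (PySem.List.pyRange 0 N 1).filter (fun i => pawns.all fun p => decide (i ≠ p.1))
      = (PySem.List.pyRange 0 N 1).filter
          (fun r => !(PySem.Set.contains (PySem.Set.ofList (pawns.map Prod.fst)) r)) := by
    refine List.filter_congr ?_
    intro x _
    rw [Bool.eq_iff_iff]
    simp only [List.all_eq_true, decide_eq_true_eq, Bool.not_eq_true', ← Bool.not_eq_true,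
      PySem.Set.contains_iff, PySem.Set.mem_ofList, List.mem_map]
    constructor
    · rintro h ⟨p, hp, he⟩
      exact h p hp he.symm
    · intro h p hp he
      exact h ⟨p, hp, he.symm⟩
  have hc : (PySem.List.pyRange 0 N 1).filter (fun j => pawns.all fun p => decide (j ≠ p.2))
      = (PySem.List.pyRange 0 N 1).filter
          (fun c => !(PySem.Set.contains (PySem.Set.ofList (pawns.map Prod.snd)) c)) := by
    refine List.filter_congr ?_
    intro x _
    rw [Bool.eq_iff_iff]
    simp only [List.all_eq_true, decide_eq_true_eq, Bool.not_eq_true', ← Bool.not_eq_true,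
      PySem.Set.contains_iff, PySem.Set.mem_ofList, List.mem_map]
    constructor
    · rintro h ⟨p, hp, he⟩
      exact h p hp he.symm
    · intro h p hp he
      exact h ⟨p, hp, he.symm⟩
  rw [hr, hc]

lemma pv_bishop_eq (N : Int) (bishops : List (Int × Int)) :
    pvBishopLoop N (bishops.foldl
        (fun f p => f.filter
          (fun q => decide (q.1 + q.2 ≠ p.1 + p.2) && decide (q.1 - q.2 ≠ p.1 - p.2))) (pvSquares N)) bishops
    = ((PySem.List.sorted (pvSquares N) (pvRankKey N)).foldl
        (fun (st : PySem.Set (Int × Int) × PySem.Set Int × PySem.Set Int) p =>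
          if !(PySem.Set.contains st.2.1 (p.1 + p.2)) && !(PySem.Set.contains st.2.2 (p.1 - p.2)) then
            (PySem.Set.add st.1 p, PySem.Set.add st.2.1 (p.1 + p.2), PySem.Set.add st.2.2 (p.1 - p.2))
          else st)
        (bishops, PySem.Set.ofList (bishops.map (fun b => b.1 + b.2)),
          PySem.Set.ofList (bishops.map (fun b => b.1 - b.2)))).1 := by
  rw [pv_foldl_filter bishops
    (fun p q => decide (q.1 + q.2 ≠ p.1 + p.2) && decide (q.1 - q.2 ≠ p.1 - p.2)) (pvSquares N)]
  have hndsq : (pvSquares N).Nodup := by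
    have h : (pvSquares N).Pairwise (fun a b => a ≠ b) := by
      refine (pv_squares_pairwise N).imp ?_
      intro a b hab he
      rw [he] at hab
      exact lt_irrefl _ hab
    exact h
  rw [pv_fold_scan _ bishops _ _
    (fun v => by rw [PySem.Set.contains_iff, PySem.Set.mem_ofList, List.mem_map])
    (fun v => by rw [PySem.Set.contains_iff, PySem.Set.mem_ofList, List.mem_map])]
  rw [pv_bishop_main N ((pvSquares N).filter _).length _ bishops le_rfl
    (fun x hx => (pv_mem_squares N x).mp (List.mem_of_mem_filter hx))
    ((pv_squares_pairwise N).filter _)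
    (fun x hx => by
      rw [List.mem_filter] at hx
      have h2 := hx.2
      simp only [List.all_eq_true, Bool.and_eq_true, decide_eq_true_eq] at h2
      intro b hb
      exact ⟨Ne.symm (h2 b hb).1, Ne.symm (h2 b hb).2⟩)]
  rw [← pv_sorted_filter_comm N (pvSquares N) _
    (fun x hx => (pv_mem_squares N x).mp hx) hndsq]
  refine (pv_scan_filter _ _ bishops ?_).symm
  intro x _ hq hfree
  rw [List.all_eq_false] at hq
  obtain ⟨p, hp, hcond⟩ := hq
  simp only [Bool.and_eq_true, decide_eq_true_eq, not_and] at hcond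
  by_cases he : x.1 + x.2 = p.1 + p.2
  · exact (hfree p hp).1 he.symm
  · have he2 : ¬ x.1 - x.2 ≠ p.1 - p.2 := hcond he
    rw [not_not] at he2
    exact (hfree p hp).2 he2.symm

-- ===== VERDICT (by name: the statement is the Claim_ definition above) =====
theorem process_spec : Claim_equal_process := by
  intro N pawns bishops _
  show process N pawns bishops = process_alt N pawns bishops
  simp only [process, process_alt]
  rw [Prod.mk.injEq]
  exact ⟨pv_pawn_eq N pawns, pv_bishop_eq N bishops⟩
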